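-- pv_equiv track=rewrite | github.com/neizod/problems | aoc/2015/p16-2.py | is_sue
-- ===== SOURCE A (Python) =====
-- TAPE = { 'children': 3,
--          'cats': 7,
--          'samoyeds': 2,
--          'pomeranians': 3,
--          'akitas': 0,
--          'vizslas': 0,
--          'goldfish': 5,
--          'trees': 3,
--          'cars': 2,
--          'perfumes': 1 }
--
-- def is_sue(features):
--     for feature, amount in features.items():
--         if feature in {'cats', 'trees'}:
--             if not TAPE[feature] < amount:
--                 return False
--         elif feature in {'pomeranians', 'goldfish'}:
--             if not TAPE[feature] > amount:
--                 return False
--         else: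
--             if not TAPE[feature] == amount:
--                 return False
--     return True
-- ===== SOURCE B (Python) =====
-- TAPE = { 'children': 3,
--          'cats': 7,
--          'samoyeds': 2,
--          'pomeranians': 3,
--          'akitas': 0,
--          'vizslas': 0,
--          'goldfish': 5,
--          'trees': 3,
--          'cars': 2,
--          'perfumes': 1 }
--
-- # Each feature's acceptable readings form an interval [lo, hi] (None = unbounded):
-- # 'cats'/'trees' are strict lower bounds, 'pomeranians'/'goldfish' strict upper
-- # bounds, everything else must match exactly.
-- RANGE = {f: ((v + 1, None) if f in {'cats', 'trees'}
--              else (None, v - 1) if f in {'pomeranians', 'goldfish'}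
--              else (v, v))
--          for f, v in TAPE.items()}
--
-- def is_sue(features):
--     ok = True
--     for feature, amount in features.items():
--         lo, hi = RANGE[feature]
--         if lo is not None and amount < lo:
--             ok = False
--         if hi is not None and amount > hi:
--             ok = False
--     return ok
-- ===== Notes on version B (the rewrite author's own statement) =====
-- stated objective: alternative
-- what changed: Instead of picking a comparison per feature inside the loop, B precomputes once an interval table RANGE mapping every feature to its acceptable [lo, hi] range (open ends as None) and then makes one full, non-short-circuiting pass that clears a flag whenever a reading falls outside its interval; A short-circuits with per-branch </>/== tests. Pre_ excludes feature dicts containing a key absent from TAPE: Python raises KeyError there (A only when no earlier feature already failed).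
-- outside the precondition, e.g. on is_sue({'children': 0, 'foo': 1}): A returns False, B raises KeyError
import Mathlib
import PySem

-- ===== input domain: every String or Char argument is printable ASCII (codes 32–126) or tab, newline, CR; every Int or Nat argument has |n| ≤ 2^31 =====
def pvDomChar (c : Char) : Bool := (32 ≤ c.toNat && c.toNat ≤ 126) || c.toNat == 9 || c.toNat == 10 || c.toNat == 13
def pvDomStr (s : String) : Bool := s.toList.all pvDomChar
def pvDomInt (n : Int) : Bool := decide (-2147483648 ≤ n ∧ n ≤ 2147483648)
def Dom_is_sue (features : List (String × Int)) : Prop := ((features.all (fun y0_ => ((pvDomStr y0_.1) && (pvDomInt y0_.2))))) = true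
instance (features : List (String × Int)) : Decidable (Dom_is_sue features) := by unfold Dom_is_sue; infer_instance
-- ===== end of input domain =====

-- B precomputes an interval table (feature -> allowed [lo, hi]) and makes one full non-short-circuiting
-- pass clearing a flag, instead of A's short-circuiting per-branch comparison loop; alternative, not faster.

-- shared module constant TAPE (a Python dict literal)
def pvTAPE : PySem.Dict String Int :=
  PySem.Dict.ofList [("children", 3), ("cats", 7), ("samoyeds", 2), ("pomeranians", 3),
                     ("akitas", 0), ("vizslas", 0), ("goldfish", 5), ("trees", 3),
                     ("cars", 2), ("perfumes", 1)]

-- ===== PORT A =====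
-- 'TAPE[feature]' raises KeyError when absent: the 'none' branch is excluded by Pre_is_sue.
def is_sue : List (String × Int) → Bool
  | [] => true
  | (feature, amount) :: rest =>
    if feature ∈ ["cats", "trees"] then
      match pvTAPE.get? feature with
      | none => false        -- KeyError, outside Pre_
      | some t => if ¬ (t < amount) then false else is_sue rest
    else if feature ∈ ["pomeranians", "goldfish"] then
      match pvTAPE.get? feature with
      | none => false        -- KeyError, outside Pre_
      | some t => if ¬ (t > amount) then false else is_sue rest
    else
      match pvTAPE.get? feature with
      | none => false        -- KeyError, outside Pre_
      | some t => if ¬ (t = amount) then false else is_sue rest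

-- ===== PORT B =====
-- module-level comprehension: RANGE = {f: interval for f, v in TAPE.items()}
def pvRANGE : PySem.Dict String (Option Int × Option Int) :=
  PySem.Dict.ofList (pvTAPE.items.map (fun fv =>
    (fv.1, if fv.1 ∈ ["cats", "trees"] then (some (fv.2 + 1), none)
           else if fv.1 ∈ ["pomeranians", "goldfish"] then (none, some (fv.2 - 1))
           else (some fv.2, some fv.2))))

-- 'lo is not None and amount < lo' / 'hi is not None and amount > hi'
def pvBelowLo : Option Int → Int → Bool
  | some l, a => decide (a < l)
  | none,   _ => false

def pvAboveHi : Option Int → Int → Bool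
  | some h, a => decide (h < a)
  | none,   _ => false

-- B's loop with its 'ok' flag accumulator; 'RANGE[feature]' raises KeyError when absent (outside Pre_)
def pvIsSueAltGo : Bool → List (String × Int) → Bool
  | ok, [] => ok
  | ok, (feature, amount) :: rest =>
    match pvRANGE.get? feature with
    | none => false          -- KeyError, outside Pre_
    | some (lo, hi) =>
      let ok1 := if pvBelowLo lo amount then false else ok
      let ok2 := if pvAboveHi hi amount then false else ok1
      pvIsSueAltGo ok2 rest

def is_sue_alt (features : List (String × Int)) : Bool :=
  pvIsSueAltGo true features

-- ===== PRECONDITION & SPEC =====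
-- Pre_ excludes inputs with a feature name absent from TAPE: Python raises KeyError there (A only when no
-- earlier feature already failed and returned False; B always).
def Pre_is_sue (features : List (String × Int)) : Prop :=
  ∀ p ∈ features, pvTAPE.contains p.1 = true
instance (features : List (String × Int)) : Decidable (Pre_is_sue features) := by
  unfold Pre_is_sue; infer_instance

def pvWitness_is_sue : (List (String × Int)) := [("children", 3), ("cats", 9)]

def Spec_is_sue (features : List (String × Int)) (out : Bool) : Prop := out = is_sue_alt features
instance (features : List (String × Int)) (out : Bool) : Decidable (Spec_is_sue features out) := by
  unfold Spec_is_sue; infer_instance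

-- ===== CLAIM (what is proved, stated in full; the proofs are below) =====
def Claim_equal_is_sue : Prop :=
  ∀ (features : List (String × Int)), Dom_is_sue features → Pre_is_sue features →
    Spec_is_sue features (is_sue features)

-- ===== LEMMAS AND PROOFS =====

-- the value A's loop body contributes for one feature (false also on the KeyError branch)
def pvStepA (f : String) (a : Int) : Bool :=
  match pvTAPE.get? f with
  | none => false
  | some t =>
    if f ∈ ["cats", "trees"] then decide (t < a)
    else if f ∈ ["pomeranians", "goldfish"] then decide (t > a)
    else decide (t = a)

lemma pvTAPE_eq : pvTAPE = PySem.Dict.mk [("children", 3), ("cats", 7), ("samoyeds", 2),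
    ("pomeranians", 3), ("akitas", 0), ("vizslas", 0), ("goldfish", 5), ("trees", 3),
    ("cars", 2), ("perfumes", 1)] := by
  simp [pvTAPE, PySem.Dict.ofList, PySem.Dict.update, PySem.Dict.insert, PySem.Dict.contains,
    PySem.Dict.empty]

lemma pvRANGE_eq : pvRANGE = PySem.Dict.mk [("children", (some 3, some 3)), ("cats", (some 8, none)),
    ("samoyeds", (some 2, some 2)), ("pomeranians", (none, some 2)), ("akitas", (some 0, some 0)),
    ("vizslas", (some 0, some 0)), ("goldfish", (none, some 4)), ("trees", (some 4, none)),
    ("cars", (some 2, some 2)), ("perfumes", (some 1, some 1))] := by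
  simp [pvRANGE, pvTAPE_eq, PySem.Dict.ofList, PySem.Dict.update, PySem.Dict.insert,
    PySem.Dict.contains, PySem.Dict.empty]

lemma is_sue_cons (f : String) (a : Int) (rest : List (String × Int)) :
    is_sue ((f, a) :: rest) = (pvStepA f a && is_sue rest) := by
  by_cases h1 : f ∈ ["cats", "trees"]
  · rcases hg : pvTAPE.get? f with _ | t
    · simp [is_sue, pvStepA, hg]
    · simp only [is_sue, pvStepA, if_pos h1, hg]
      by_cases hc : t < a <;> simp [hc]
  · by_cases h2 : f ∈ ["pomeranians", "goldfish"]
    · rcases hg : pvTAPE.get? f with _ | t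
      · simp [is_sue, pvStepA, hg]
      · simp only [is_sue, pvStepA, if_neg h1, if_pos h2, hg]
        by_cases hc : t > a <;> simp [hc]
    · rcases hg : pvTAPE.get? f with _ | t
      · simp [is_sue, pvStepA, hg]
      · simp only [is_sue, pvStepA, if_neg h1, if_neg h2, hg]
        by_cases hc : t = a <;> simp [hc]

lemma contains_cases (f : String) (h : pvTAPE.contains f = true) :
    f = "children" ∨ f = "cats" ∨ f = "samoyeds" ∨ f = "pomeranians" ∨ f = "akitas" ∨
    f = "vizslas" ∨ f = "goldfish" ∨ f = "trees" ∨ f = "cars" ∨ f = "perfumes" := by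
  rw [pvTAPE_eq, PySem.Dict.contains_eq_decide_mem_keys] at h
  simp at h
  tauto

lemma go_cons (f : String) (a : Int) (rest : List (String × Int)) (ok : Bool)
    (h : pvTAPE.contains f = true) :
    pvIsSueAltGo ok ((f, a) :: rest) = pvIsSueAltGo (ok && pvStepA f a) rest := by
  rcases contains_cases f h with rfl | rfl | rfl | rfl | rfl | rfl | rfl | rfl | rfl | rfl <;>
  · simp only [pvIsSueAltGo, pvStepA, pvRANGE_eq, pvTAPE_eq, PySem.Dict.get?_mk_cons]
    norm_num
    congr 1
    simp only [pvBelowLo, pvAboveHi]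
    cases ok <;> simp
    all_goals try congr 1
    all_goals simp only [← decide_not, ← Bool.decide_and]
    all_goals rw [decide_eq_decide]
    all_goals omega

lemma go_eq (features : List (String × Int)) (hpre : Pre_is_sue features) (ok : Bool) :
    pvIsSueAltGo ok features = (ok && is_sue features) := by
  induction features generalizing ok with
  | nil => simp [pvIsSueAltGo, is_sue]
  | cons p rest ih =>
    obtain ⟨f, a⟩ := p
    have hf : pvTAPE.contains f = true := hpre (f, a) (List.mem_cons_self)
    have hpre' : Pre_is_sue rest := fun q hq => hpre q (List.mem_cons_of_mem _ hq)
    rw [go_cons f a rest ok hf, ih hpre', is_sue_cons, Bool.and_assoc]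

-- ===== VERDICT (by name: the statement is the Claim_ definition above) =====
theorem is_sue_spec : Claim_equal_is_sue := by
  intro features hdom hpre
  unfold Spec_is_sue is_sue_alt
  rw [go_eq features hpre true, Bool.true_and]
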